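-- pv_equiv track=rewrite | github.com/hoangduongngg/Python-Basic | Danh_sach/PY02028_Sap_xep_nguyen_to.py | Sort_NT
-- ===== SOURCE A (Python) =====
-- import math
--
-- def Sort_NT(a):
--     b = []
--     res = []
--     for i in a:
--         if SNT(i):
--             b.append(i)
--     b = sorted(b)
--     j=0
--     for i in a:
--         if SNT(i):
--             res.append(b[j])
--             j+=1
--         else:
--             res.append(i)
--     return res
--
-- def SNT(n):
--     if n==2:
--         return 1
--     if n%2 ==0 or n<2:
--         return 0
--     for i in range(3,int(math.sqrt(n))+1,2):
--         if n%i == 0: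
--             return 0
--     return 1
-- ===== SOURCE B (Python) =====
-- import math
--
-- def Sort_NT(a):
--     # Online insertion: build the result in one pass; when a prime arrives,
--     # thread it through the primes already placed (carrying the displaced,
--     # larger prime rightwards), so no separate prime list and no sort call.
--     res = []
--     for v in a:
--         if SNT(v):
--             out = []
--             cur = v
--             for x in res:
--                 if SNT(x) and x > cur:
--                     out.append(cur)
--                     cur = x
--                 else:
--                     out.append(x)
--             out.append(cur)
--             res = out
--         else:
--             res.append(v)
--     return res
--
-- def SNT(n):  # same primality helper as the original module
--     if n==2:
--         return 1
--     if n%2 ==0 or n<2: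
--         return 0
--     for i in range(3,int(math.sqrt(n))+1,2):
--         if n%i == 0:
--             return 0
--     return 1
-- ===== Notes on version B (the rewrite author's own statement) =====
-- stated objective: alternative
-- what changed: B builds the result in a single online pass with no sort call and no extracted prime list: each arriving prime is threaded through the primes already placed via a carry that displaces larger primes one prime-slot rightwards (an online insertion sort interleaved with output construction), whereas A extracts the primes, library-sorts them, and re-scans the input to reinsert them.
import Mathlib
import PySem

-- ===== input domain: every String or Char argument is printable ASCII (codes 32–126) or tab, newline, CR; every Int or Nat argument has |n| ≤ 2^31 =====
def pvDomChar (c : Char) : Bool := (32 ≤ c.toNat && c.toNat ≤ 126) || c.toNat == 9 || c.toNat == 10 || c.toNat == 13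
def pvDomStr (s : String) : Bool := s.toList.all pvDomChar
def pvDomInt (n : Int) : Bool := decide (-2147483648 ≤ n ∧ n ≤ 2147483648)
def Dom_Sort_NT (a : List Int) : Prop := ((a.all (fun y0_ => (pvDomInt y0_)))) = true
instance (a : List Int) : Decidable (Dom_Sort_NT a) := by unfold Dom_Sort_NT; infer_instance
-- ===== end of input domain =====

-- B replaces A's extract/sort/reinsert staging by one online pass that threads each arriving
-- prime through the primes already placed; neither program mutates `a`.

-- ===== PORT A =====
-- Helper SNT(n): identical code in Source A and Source B; shared by both ports.
-- `int(math.sqrt(n))` is ported as `Nat.sqrt n.toNat`: exact on the admitted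
-- range (here n ≥ 3 and |n| ≤ 2^31, where the double sqrt floors to isqrt).
def SNT (n : Int) : Bool :=
  if n == 2 then true
  else if n % 2 == 0 || n < 2 then false
  else if (PySem.List.pyRange 3 ((Nat.sqrt n.toNat : Int) + 1) 2).any (fun i => n % i == 0)
    then false else true

def Sort_NT (a : List Int) : List Int :=
  let b := a.foldl (fun b i => if SNT i then b ++ [i] else b) []
  let b := PySem.List.sorted b (fun x => x) false
  -- second loop: state (res, j); b[j] is always in range here, so pyGetD is exact
  (a.foldl (fun (st : List Int × Int) i =>
      if SNT i then (st.1 ++ [PySem.List.pyGetD b st.2 0], st.2 + 1)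
      else (st.1 ++ [i], st.2)) ([], 0)).1

-- ===== PORT B =====
-- inner loop of Source B for a prime v: state (out, cur)
def insPrime (res : List Int) (v : Int) : List Int :=
  let st := res.foldl (fun (st : List Int × Int) x =>
      if SNT x ∧ st.2 < x then (st.1 ++ [st.2], x) else (st.1 ++ [x], st.2)) ([], v)
  st.1 ++ [st.2]

def Sort_NT_alt (a : List Int) : List Int :=
  a.foldl (fun res v => if SNT v then insPrime res v else res ++ [v]) []

-- ===== PRECONDITION & SPEC =====
def Spec_Sort_NT (a : List Int) (out : List Int) : Prop := out = Sort_NT_alt a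
instance (a : List Int) (out : List Int) : Decidable (Spec_Sort_NT a out) := by unfold Spec_Sort_NT; infer_instance

-- ===== CLAIM (what is proved, stated in full; the proofs are below) =====
def Claim_equal_Sort_NT : Prop := ∀ (a : List Int), Dom_Sort_NT a → Spec_Sort_NT a (Sort_NT a)

-- ===== LEMMAS AND PROOFS =====

-- Common specification: replace the prime positions of `t` by the elements of `s` in order.
def mergeP : List Int → List Int → List Int
  | [], _ => []
  | x :: t, s =>
    if SNT x then
      match s with
      | [] => x :: mergeP t []          -- unreachable when s.length = countP
      | p :: s' => p :: mergeP t s'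
    else x :: mergeP t s

-- A's second loop computes mergeP.
lemma A_loop (t : List Int) : ∀ (b res : List Int) (j : Int), 0 ≤ j →
    j.toNat + t.countP (fun i => SNT i) ≤ b.length →
    (t.foldl (fun (st : List Int × Int) i =>
      if SNT i then (st.1 ++ [PySem.List.pyGetD b st.2 0], st.2 + 1)
      else (st.1 ++ [i], st.2)) (res, j)).1 = res ++ mergeP t (b.drop j.toNat) := by
  induction t with
  | nil => intro b res j _ _; simp [mergeP]
  | cons x t ih =>
    intro b res j hj hlen
    by_cases hx : SNT x
    · have hcount : t.countP (fun i => SNT i) + 1 = (x :: t).countP (fun i => SNT i) := by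
        simp [hx]
      have hjb : j.toNat < b.length := by omega
      have hj2 : j < (b.length : Int) := by omega
      have hget : PySem.List.pyGetD b j 0 = b[j.toNat] :=
        PySem.List.pyGetD_eq_getElem b 0 hj hj2
      have hdrop : b.drop j.toNat = b[j.toNat] :: b.drop (j.toNat + 1) :=
        List.drop_eq_getElem_cons hjb
      have hj1 : (j + 1).toNat = j.toNat + 1 := by omega
      simp only [List.foldl_cons, hx, if_pos]
      rw [ih b (res ++ [PySem.List.pyGetD b j 0]) (j + 1) (by omega) (by omega)]
      rw [hget, hj1, hdrop]
      simp [mergeP, hx]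
    · simp only [List.foldl_cons, hx, if_neg, Bool.false_eq_true, not_false_iff]
      rw [ih b (res ++ [x]) j hj (by simp [hx] at hlen ⊢; omega)]
      simp [mergeP, hx]

lemma Sort_NT_eq_mergeP (a : List Int) :
    Sort_NT a = mergeP a (PySem.List.sorted (a.filter (fun i => SNT i)) (fun x => x) false) := by
  unfold Sort_NT
  rw [PySem.List.foldl_append_if_eq_filter]
  simp only [List.nil_append]
  have h := A_loop a (PySem.List.sorted (a.filter (fun i => SNT i)) (fun x => x) false) [] 0
    le_rfl (by rw [PySem.List.length_sorted, ← List.countP_eq_length_filter]; simp)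
  simpa using h

-- ===== B-side theory: the carry pass =====

-- recursion computed by insPrime's fold: (emitted list, final carry)
def ibody : List Int → Int → List Int × Int
  | [], cur => ([], cur)
  | x :: r, cur =>
    if SNT x ∧ cur < x then ((ibody r x).1.cons cur, (ibody r x).2)
    else ((ibody r cur).1.cons x, (ibody r cur).2)

-- the same pass on the prime sublist only
def carry : Int → List Int → List Int × Int
  | cur, [] => ([], cur)
  | cur, p :: s =>
    if cur < p then ((carry p s).1.cons cur, (carry p s).2)
    else ((carry cur s).1.cons p, (carry cur s).2)

def carryFull (cur : Int) (s : List Int) : List Int := (carry cur s).1 ++ [(carry cur s).2]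

lemma fold_ibody (r : List Int) : ∀ (acc : List Int) (cur : Int),
    r.foldl (fun (st : List Int × Int) x =>
      if SNT x ∧ st.2 < x then (st.1 ++ [st.2], x) else (st.1 ++ [x], st.2)) (acc, cur)
    = (acc ++ (ibody r cur).1, (ibody r cur).2) := by
  induction r with
  | nil => intro acc cur; simp [ibody]
  | cons x r ih =>
    intro acc cur
    by_cases h : SNT x ∧ cur < x
    · simp only [List.foldl_cons, if_pos h, ih, ibody]
      simp
    · simp only [List.foldl_cons, if_neg h, ih, ibody]
      simp

lemma carry_length (s : List Int) : ∀ cur, (carry cur s).1.length = s.length := by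
  induction s with
  | nil => intro cur; simp [carry]
  | cons p s ih =>
    intro cur
    by_cases h : cur < p <;> simp [carry, h, ih]

lemma carryFull_perm (s : List Int) : ∀ cur, (carryFull cur s).Perm (cur :: s) := by
  induction s with
  | nil => intro cur; simp [carryFull, carry]
  | cons p s ih =>
    intro cur
    by_cases h : cur < p
    · have h1 : carryFull cur (p :: s) = cur :: carryFull p s := by
        simp [carryFull, carry, h]
      rw [h1]; exact (ih p).cons cur
    · have h1 : carryFull cur (p :: s) = p :: carryFull cur s := by
        simp [carryFull, carry, h]
      rw [h1]; exact ((ih cur).cons p).trans (List.Perm.swap cur p s)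

lemma carryFull_mem {q : Int} {cur : Int} {s : List Int} (h : q ∈ carryFull cur s) :
    q = cur ∨ q ∈ s := by
  have := (carryFull_perm s cur).mem_iff.mp h
  simpa using this

lemma carryFull_sorted (s : List Int) : ∀ cur, s.Pairwise (· ≤ ·) →
    (carryFull cur s).Pairwise (· ≤ ·) := by
  induction s with
  | nil => intro cur _; simp [carryFull, carry]
  | cons p s ih =>
    intro cur hs
    rw [List.pairwise_cons] at hs
    by_cases h : cur < p
    · have : carryFull cur (p :: s) = cur :: carryFull p s := by
        simp [carryFull, carry, h]
      rw [this, List.pairwise_cons]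
      refine ⟨fun q hq => ?_, ih p hs.2⟩
      rcases carryFull_mem hq with rfl | hq
      · exact le_of_lt h
      · exact le_of_lt (lt_of_lt_of_le h (hs.1 q hq))
    · have : carryFull cur (p :: s) = p :: carryFull cur s := by
        simp [carryFull, carry, h]
      rw [this, List.pairwise_cons]
      refine ⟨fun q hq => ?_, ih cur hs.2⟩
      rcases carryFull_mem hq with rfl | hq
      · exact le_of_not_gt h
      · exact hs.1 q hq
    
lemma carryFull_prime {cur : Int} {s : List Int} (hc : SNT cur = true)
    (hs : ∀ p ∈ s, SNT p = true) : ∀ q ∈ carryFull cur s, SNT q = true := by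
  intro q hq
  rcases carryFull_mem hq with rfl | hq
  · exact hc
  · exact hs q hq

-- ibody over mergeP reduces to carry on the prime sublist
lemma ibody_mergeP (t : List Int) : ∀ (s : List Int) (cur : Int),
    s.length = t.countP (fun i => SNT i) → (∀ p ∈ s, SNT p = true) →
    ibody (mergeP t s) cur = (mergeP t (carry cur s).1, (carry cur s).2) := by
  induction t with
  | nil =>
    intro s cur hlen _
    have : s = [] := List.eq_nil_of_length_eq_zero (by simpa using hlen)
    subst this
    simp [mergeP, ibody, carry]
  | cons x t ih =>
    intro s cur hlen hs
    by_cases hx : SNT x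
    · cases s with
      | nil => exfalso; simp [hx] at hlen
      | cons p s' =>
        have hp : SNT p = true := hs p (by simp)
        have hs' : ∀ q ∈ s', SNT q = true := fun q hq => hs q (by simp [hq])
        have hlen' : s'.length = t.countP (fun i => SNT i) := by
          simp [hx] at hlen; omega
        have hm : mergeP (x :: t) (p :: s') = p :: mergeP t s' := by
          simp [mergeP, hx]
        rw [hm]
        by_cases h : cur < p
        · have : SNT p ∧ cur < p := ⟨hp, h⟩
          simp only [ibody, if_pos this, ih s' p hlen' hs']
          simp [carry, h, mergeP, hx]
        · have : ¬ (SNT p = true ∧ cur < p) := fun hh => h hh.2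
          simp only [ibody, if_neg this, ih s' cur hlen' hs']
          simp [carry, h, mergeP, hx]
    · have hm : mergeP (x :: t) s = x :: mergeP t s := by
        simp [mergeP, hx]
      have hlen' : s.length = t.countP (fun i => SNT i) := by
        simp [hx] at hlen; exact hlen
      have : ¬ (SNT x = true ∧ cur < x) := fun hh => by simp [hh.1] at hx
      rw [hm]
      simp only [ibody, if_neg this, ih s cur hlen' hs]
      simp [mergeP, hx]

lemma mergeP_append_prime (t : List Int) : ∀ (s1 : List Int) (c v : Int), SNT v = true →
    s1.length = t.countP (fun i => SNT i) →
    mergeP (t ++ [v]) (s1 ++ [c]) = mergeP t s1 ++ [c] := by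
  induction t with
  | nil =>
    intro s1 c v hv hlen
    have : s1 = [] := List.eq_nil_of_length_eq_zero (by simpa using hlen)
    subst this
    simp [mergeP, hv]
  | cons x t ih =>
    intro s1 c v hv hlen
    by_cases hx : SNT x
    · cases s1 with
      | nil => exfalso; simp [hx] at hlen
      | cons p s' =>
        have hlen' : s'.length = t.countP (fun i => SNT i) := by
          simp [hx] at hlen; omega
        simp [mergeP, hx, ih s' c v hv hlen']
    · have hlen' : s1.length = t.countP (fun i => SNT i) := by
        simp [hx] at hlen; exact hlen
      simp [mergeP, hx, ih s1 c v hv hlen']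

lemma mergeP_append_nonprime (t : List Int) : ∀ (s : List Int) (v : Int), SNT v = false →
    s.length = t.countP (fun i => SNT i) →
    mergeP (t ++ [v]) s = mergeP t s ++ [v] := by
  induction t with
  | nil =>
    intro s v hv hlen
    have : s = [] := List.eq_nil_of_length_eq_zero (by simpa using hlen)
    subst this
    simp [mergeP, hv]
  | cons x t ih =>
    intro s v hv hlen
    by_cases hx : SNT x
    · cases s with
      | nil => exfalso; simp [hx] at hlen
      | cons p s' =>
        have hlen' : s'.length = t.countP (fun i => SNT i) := by
          simp [hx] at hlen; omega
        simp [mergeP, hx, ih s' v hv hlen']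
    · have hlen' : s.length = t.countP (fun i => SNT i) := by
        simp [hx] at hlen; exact hlen
      simp [mergeP, hx, ih s v hv hlen']

-- the prime multiset as B's fold accumulates it
def foldCarry (rest s : List Int) : List Int :=
  rest.foldl (fun s v => if SNT v then carryFull v s else s) s

lemma insPrime_mergeP {t s : List Int} {v : Int}
    (hlen : s.length = t.countP (fun i => SNT i)) (hs : ∀ p ∈ s, SNT p = true) :
    insPrime (mergeP t s) v = mergeP t (carry v s).1 ++ [(carry v s).2] := by
  unfold insPrime
  rw [fold_ibody, ibody_mergeP t s v hlen hs]
  simp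

lemma B_fold (rest : List Int) : ∀ (t s : List Int),
    s.length = t.countP (fun i => SNT i) → (∀ p ∈ s, SNT p = true) →
    rest.foldl (fun res v => if SNT v then insPrime res v else res ++ [v]) (mergeP t s)
    = mergeP (t ++ rest) (foldCarry rest s) := by
  induction rest with
  | nil => intro t s _ _; simp [foldCarry]
  | cons v rest ih =>
    intro t s hlen hs
    by_cases hv : SNT v
    · have h1 : insPrime (mergeP t s) v = mergeP (t ++ [v]) (carryFull v s) := by
        rw [insPrime_mergeP hlen hs]
        exact (mergeP_append_prime t (carry v s).1 (carry v s).2 v hv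
          (by rw [carry_length]; exact hlen)).symm
      have hlen2 : (carryFull v s).length = (t ++ [v]).countP (fun i => SNT i) := by
        simp [carryFull, carry_length, hv, hlen]
      have hs2 : ∀ p ∈ carryFull v s, SNT p = true := carryFull_prime hv hs
      simp only [List.foldl_cons, hv, if_pos, h1]
      rw [ih (t ++ [v]) (carryFull v s) hlen2 hs2]
      simp [foldCarry, hv]
    · have h1 : mergeP t s ++ [v] = mergeP (t ++ [v]) s :=
        (mergeP_append_nonprime t s v (by simpa using hv) hlen).symm
      simp only [List.foldl_cons, hv, if_neg, Bool.false_eq_true, not_false_iff, h1]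
      rw [ih (t ++ [v]) s (by simp [hv, hlen]) hs]
      simp [foldCarry, hv]

lemma foldCarry_perm (rest : List Int) : ∀ (s : List Int),
    (foldCarry rest s).Perm (s ++ rest.filter (fun i => SNT i)) := by
  induction rest with
  | nil => intro s; simp [foldCarry]
  | cons v rest ih =>
    intro s
    by_cases hv : SNT v
    · have h1 : foldCarry (v :: rest) s = foldCarry rest (carryFull v s) := by
        simp [foldCarry, hv]
      rw [h1]
      refine (ih (carryFull v s)).trans ?_
      have h2 : (carryFull v s ++ rest.filter (fun i => SNT i)).Perm
          ((v :: s) ++ rest.filter (fun i => SNT i)) :=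
        (carryFull_perm s v).append_right _
      refine h2.trans ?_
      simp only [List.cons_append, List.filter_cons, hv]
      exact (List.perm_middle).symm
    · have h1 : foldCarry (v :: rest) s = foldCarry rest s := by
        simp [foldCarry, hv]
      rw [h1]
      refine (ih s).trans ?_
      simp [hv]

lemma foldCarry_sorted (rest : List Int) : ∀ (s : List Int), s.Pairwise (· ≤ ·) →
    (foldCarry rest s).Pairwise (· ≤ ·) := by
  induction rest with
  | nil => intro s hs; simpa [foldCarry] using hs
  | cons v rest ih =>
    intro s hs
    by_cases hv : SNT v
    · have h1 : foldCarry (v :: rest) s = foldCarry rest (carryFull v s) := by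
        simp [foldCarry, hv]
      rw [h1]; exact ih _ (carryFull_sorted s v hs)
    · have h1 : foldCarry (v :: rest) s = foldCarry rest s := by
        simp [foldCarry, hv]
      rw [h1]; exact ih s hs

lemma foldCarry_eq_sorted (a : List Int) :
    foldCarry a [] = PySem.List.sorted (a.filter (fun i => SNT i)) (fun x => x) false := by
  have h1 : (foldCarry a []).Perm (a.filter (fun i => SNT i)) := by
    simpa using foldCarry_perm a []
  have h2 : (foldCarry a []).Pairwise (· ≤ ·) := foldCarry_sorted a [] (by simp)
  exact (PySem.List.sorted_id_eq_of_perm_of_pairwise _ _ h1 h2).symm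

lemma Sort_NT_alt_eq_mergeP (a : List Int) :
    Sort_NT_alt a = mergeP a (PySem.List.sorted (a.filter (fun i => SNT i)) (fun x => x) false) := by
  unfold Sort_NT_alt
  have h := B_fold a [] [] (by simp) (by simp)
  rw [List.nil_append, foldCarry_eq_sorted] at h
  exact h

-- ===== VERDICT (by name: the statement is the Claim_ definition above) =====
theorem Sort_NT_spec : Claim_equal_Sort_NT := by
  intro a _
  unfold Spec_Sort_NT
  rw [Sort_NT_eq_mergeP, Sort_NT_alt_eq_mergeP]
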